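-- pv_equiv track=rewrite | github.com/Delldogf/PROMETHEUS | prometheus/oracle/formalizer.py | detect_math_domains
-- ===== SOURCE A (Python) =====
-- from typing import List, Optional, Dict, Any
--
-- def detect_math_domains(text: str) -> List[str]:
--     """Detect which mathematical areas this problem involves."""
--     text_lower = text.lower()
--     domains = []
--
--     # Number theory indicators
--     nt_patterns = ["divides", "divisible", "mod", "prime", "gcd", "lcm",
--                    "congruent", "coprime", "factor"]
--     if any(p in text_lower for p in nt_patterns):
--         domains.append("number_theory")
--
--     # Algebra indicators
--     alg_patterns = ["polynomial", "equation", "quadratic", "root",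
--                     "expression", "simplify", "expand", "factor"]
--     if any(p in text_lower for p in alg_patterns):
--         domains.append("algebra")
--
--     # Geometry indicators
--     geo_patterns = ["triangle", "circle", "angle", "point", "line",
--                     "perpendicular", "parallel", "inscribed", "area"]
--     if any(p in text_lower for p in geo_patterns):
--         domains.append("geometry")
--
--     # Combinatorics indicators
--     combo_patterns = ["count", "arrange", "choose", "permutation",
--                       "combination", "sequence", "subset", "partition"]
--     if any(p in text_lower for p in combo_patterns):
--         domains.append("combinatorics")
--
--     # Default to algebra if nothing detected
--     if not domains:
--         domains.append("algebra")
--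
--     return domains
-- ===== SOURCE B (Python) =====
-- def detect_math_domains(text):
--     """Detect which mathematical areas this problem involves."""
--     text_lower = text.lower()
--     # one combined keyword -> domains table ("factor" belongs to two domains)
--     table = [
--         ("divides", ("number_theory",)), ("divisible", ("number_theory",)),
--         ("mod", ("number_theory",)), ("prime", ("number_theory",)),
--         ("gcd", ("number_theory",)), ("lcm", ("number_theory",)),
--         ("congruent", ("number_theory",)), ("coprime", ("number_theory",)),
--         ("factor", ("number_theory", "algebra")),
--         ("polynomial", ("algebra",)), ("equation", ("algebra",)),
--         ("quadratic", ("algebra",)), ("root", ("algebra",)),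
--         ("expression", ("algebra",)), ("simplify", ("algebra",)),
--         ("expand", ("algebra",)),
--         ("triangle", ("geometry",)), ("circle", ("geometry",)),
--         ("angle", ("geometry",)), ("point", ("geometry",)),
--         ("line", ("geometry",)), ("perpendicular", ("geometry",)),
--         ("parallel", ("geometry",)), ("inscribed", ("geometry",)),
--         ("area", ("geometry",)),
--         ("count", ("combinatorics",)), ("arrange", ("combinatorics",)),
--         ("choose", ("combinatorics",)), ("permutation", ("combinatorics",)),
--         ("combination", ("combinatorics",)), ("sequence", ("combinatorics",)),
--         ("subset", ("combinatorics",)), ("partition", ("combinatorics",)),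
--     ]
--     matched = set()
--     for kw, doms in table:
--         if kw in text_lower:
--             matched.update(doms)
--     result = [d for d in ("number_theory", "algebra", "geometry", "combinatorics")
--               if d in matched]
--     return result if result else ["algebra"]
-- ===== Notes on version B (the rewrite author's own statement) =====
-- stated objective: alternative
-- what changed: Replaces four separate per-domain any() scans plus an append-built list by a single combined keyword->domains table scanned once into a matched set, with the output reconstructed by filtering the canonical domain order and falling back to ['algebra'].
import Mathlib
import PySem

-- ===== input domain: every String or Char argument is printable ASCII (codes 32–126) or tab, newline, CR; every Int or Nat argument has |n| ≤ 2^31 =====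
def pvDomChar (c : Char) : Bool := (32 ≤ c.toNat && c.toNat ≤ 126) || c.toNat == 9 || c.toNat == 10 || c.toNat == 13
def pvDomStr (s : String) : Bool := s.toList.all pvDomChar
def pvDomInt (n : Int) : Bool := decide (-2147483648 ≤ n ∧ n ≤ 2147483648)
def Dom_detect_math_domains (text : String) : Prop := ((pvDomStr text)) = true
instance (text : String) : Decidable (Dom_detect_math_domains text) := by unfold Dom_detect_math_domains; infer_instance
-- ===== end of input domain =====

-- B replaces A's four per-domain any() scans by one combined keyword->domains table
-- scanned once into a matched set, emitting the canonical order filtered to that set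
-- (objective: alternative decomposition; same cost).

-- ===== PORT A =====
def pvNtPatterns : List String :=
  ["divides", "divisible", "mod", "prime", "gcd", "lcm", "congruent", "coprime", "factor"]
def pvAlgPatterns : List String :=
  ["polynomial", "equation", "quadratic", "root", "expression", "simplify", "expand", "factor"]
def pvGeoPatterns : List String :=
  ["triangle", "circle", "angle", "point", "line", "perpendicular", "parallel", "inscribed", "area"]
def pvComboPatterns : List String :=
  ["count", "arrange", "choose", "permutation", "combination", "sequence", "subset", "partition"]

def detect_math_domains (text : String) : List String :=
  let text_lower := PySem.Str.lower text
  let domains : List String := []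
  let domains := if pvNtPatterns.any (fun p => PySem.Str.isIn p text_lower) then domains ++ ["number_theory"] else domains
  let domains := if pvAlgPatterns.any (fun p => PySem.Str.isIn p text_lower) then domains ++ ["algebra"] else domains
  let domains := if pvGeoPatterns.any (fun p => PySem.Str.isIn p text_lower) then domains ++ ["geometry"] else domains
  let domains := if pvComboPatterns.any (fun p => PySem.Str.isIn p text_lower) then domains ++ ["combinatorics"] else domains
  let domains := if domains = [] then domains ++ ["algebra"] else domains
  domains

-- ===== PORT B =====
def pvTable : List (String × List String) :=
  [("divides", ["number_theory"]), ("divisible", ["number_theory"]),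
   ("mod", ["number_theory"]), ("prime", ["number_theory"]),
   ("gcd", ["number_theory"]), ("lcm", ["number_theory"]),
   ("congruent", ["number_theory"]), ("coprime", ["number_theory"]),
   ("factor", ["number_theory", "algebra"]),
   ("polynomial", ["algebra"]), ("equation", ["algebra"]),
   ("quadratic", ["algebra"]), ("root", ["algebra"]),
   ("expression", ["algebra"]), ("simplify", ["algebra"]),
   ("expand", ["algebra"]),
   ("triangle", ["geometry"]), ("circle", ["geometry"]),
   ("angle", ["geometry"]), ("point", ["geometry"]),
   ("line", ["geometry"]), ("perpendicular", ["geometry"]),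
   ("parallel", ["geometry"]), ("inscribed", ["geometry"]),
   ("area", ["geometry"]),
   ("count", ["combinatorics"]), ("arrange", ["combinatorics"]),
   ("choose", ["combinatorics"]), ("permutation", ["combinatorics"]),
   ("combination", ["combinatorics"]), ("sequence", ["combinatorics"]),
   ("subset", ["combinatorics"]), ("partition", ["combinatorics"])]

def detect_math_domains_alt (text : String) : List String :=
  let text_lower := PySem.Str.lower text
  let matched : List String :=
    pvTable.foldl (fun s p => if PySem.Str.isIn p.1 text_lower then PySem.Set.update s p.2 else s) PySem.Set.empty
  let result := ["number_theory", "algebra", "geometry", "combinatorics"].filter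
    (fun d => PySem.Set.contains matched d)
  if result = [] then ["algebra"] else result

-- ===== PRECONDITION & SPEC =====
def Spec_detect_math_domains (text : String) (out : List String) : Prop := out = detect_math_domains_alt text
instance (text : String) (out : List String) : Decidable (Spec_detect_math_domains text out) := by unfold Spec_detect_math_domains; infer_instance

-- ===== CLAIM (what is proved, stated in full; the proofs are below) =====
def Claim_equal_detect_math_domains : Prop := ∀ (text : String), Dom_detect_math_domains text → Spec_detect_math_domains text (detect_math_domains text)

-- ===== LEMMAS AND PROOFS =====

theorem pv_contains_update (s xs : List String) (d : String) :
    PySem.Set.contains (PySem.Set.update s xs) d = (PySem.Set.contains s d || xs.contains d) := by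
  rw [Bool.eq_iff_iff]
  simp [PySem.Set.update_eq_append_filter, List.mem_filter,
        PySem.Set.mem_ofList]
  tauto

theorem pv_contains_foldl (tl : String) (table : List (String × List String)) (s : List String) (d : String) :
    PySem.Set.contains
      (table.foldl (fun s p => if PySem.Str.isIn p.1 tl then PySem.Set.update s p.2 else s) s) d
    = (PySem.Set.contains s d || table.any (fun p => PySem.Str.isIn p.1 tl && p.2.contains d)) := by
  induction table generalizing s with
  | nil => simp
  | cons hd tb ih =>
    simp only [List.foldl_cons, List.any_cons]
    by_cases h : PySem.Str.isIn hd.1 tl = true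
    · rw [if_pos h, ih, pv_contains_update, h]
      cases PySem.Set.contains s d <;> cases hd.2.contains d <;> simp
    · rw [if_neg h, ih, Bool.eq_false_iff.mpr h]
      simp

theorem pv_dom_nt (tl : String) :
    (pvTable.any fun p => PySem.Str.isIn p.1 tl && p.2.contains "number_theory")
    = (pvNtPatterns.any fun p => PySem.Str.isIn p tl) := by
  simp [pvTable, pvNtPatterns]

theorem pv_dom_alg (tl : String) :
    (pvTable.any fun p => PySem.Str.isIn p.1 tl && p.2.contains "algebra")
    = (pvAlgPatterns.any fun p => PySem.Str.isIn p tl) := by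
  cases hf : PySem.Str.isIn "factor" tl <;>
    simp [PySem.Str.isIn] at hf <;>
    simp [pvTable, pvAlgPatterns, hf]

theorem pv_dom_geo (tl : String) :
    (pvTable.any fun p => PySem.Str.isIn p.1 tl && p.2.contains "geometry")
    = (pvGeoPatterns.any fun p => PySem.Str.isIn p tl) := by
  simp [pvTable, pvGeoPatterns]

theorem pv_dom_combo (tl : String) :
    (pvTable.any fun p => PySem.Str.isIn p.1 tl && p.2.contains "combinatorics")
    = (pvComboPatterns.any fun p => PySem.Str.isIn p tl) := by
  simp [pvTable, pvComboPatterns]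

-- ===== VERDICT (by name: the statement is the Claim_ definition above) =====
theorem detect_math_domains_spec : Claim_equal_detect_math_domains := by
  intro text _
  unfold Spec_detect_math_domains detect_math_domains detect_math_domains_alt
  simp only [List.filter_cons, List.filter_nil, pv_contains_foldl,
             pv_dom_nt, pv_dom_alg, pv_dom_geo, pv_dom_combo,
             PySem.Set.empty, List.contains_nil, Bool.false_or]
  generalize (pvNtPatterns.any fun p => PySem.Str.isIn p (PySem.Str.lower text)) = b1
  generalize (pvAlgPatterns.any fun p => PySem.Str.isIn p (PySem.Str.lower text)) = b2
  generalize (pvGeoPatterns.any fun p => PySem.Str.isIn p (PySem.Str.lower text)) = b3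
  generalize (pvComboPatterns.any fun p => PySem.Str.isIn p (PySem.Str.lower text)) = b4
  cases b1 <;> cases b2 <;> cases b3 <;> cases b4 <;> simp
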